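-- pv_equiv track=rewrite | github.com/varadi1/customercare | backend/app/email/name_extractor.py | is_company_name
-- ===== SOURCE A (Python) =====
-- _COMPANY_SUFFIXES = [
--     "kft", "kft.", "bt", "bt.", "zrt", "zrt.", "nyrt", "nyrt.",
--     "rt", "rt.", "ev", "ev.", "e.v.",
--     "gmbh", "ltd", "llc", "inc", "ag", "s.r.o.",
-- ]
--
-- def is_company_name(sender_name: str) -> bool:
--     """Check if the sender name is a company, not a person."""
--     if not sender_name:
--         return False
--
--     lower = sender_name.lower().strip()
--
--     # Check company suffixes
--     for suffix in _COMPANY_SUFFIXES: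
--         if lower.endswith(f" {suffix}") or f" {suffix} " in f" {lower} ":
--             return True
--         if lower.endswith(f" {suffix}."):
--             return True
--
--     # Very long names with dashes are usually companies
--     if len(sender_name) > 40 and " - " in sender_name:
--         return True
--
--     return False
-- ===== SOURCE B (Python) =====
-- _COMPANY_SUFFIXES = [
--     "kft", "kft.", "bt", "bt.", "zrt", "zrt.", "nyrt", "nyrt.",
--     "rt", "rt.", "ev", "ev.", "e.v.",
--     "gmbh", "ltd", "llc", "inc", "ag", "s.r.o.",
-- ]
--
--
-- def is_company_name(sender_name: str) -> bool:
--     """Check if the sender name is a company, not a person."""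
--     if not sender_name:
--         return False
--
--     suffixes = set(_COMPANY_SUFFIXES)
--     tokens = sender_name.lower().strip().split(" ")
--
--     # Any space-delimited word that is a known company suffix.
--     if any(token in suffixes for token in tokens):
--         return True
--
--     # Trailing "<suffix>." as the last of at least two words.
--     if len(tokens) >= 2 and tokens[-1].endswith(".") and tokens[-1][:-1] in suffixes:
--         return True
--
--     # Very long names with dashes are usually companies.
--     return len(sender_name) > 40 and " - " in sender_name
-- ===== Notes on version B (the rewrite author's own statement) =====
-- stated objective: simpler
-- what changed: Replaces the 19-iteration suffix loop doing three substring/endswith scans of the padded name per suffix by a single split of the name into space-delimited tokens checked against a suffix set, plus one last-token check for the trailing-period variant.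
import Mathlib
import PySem

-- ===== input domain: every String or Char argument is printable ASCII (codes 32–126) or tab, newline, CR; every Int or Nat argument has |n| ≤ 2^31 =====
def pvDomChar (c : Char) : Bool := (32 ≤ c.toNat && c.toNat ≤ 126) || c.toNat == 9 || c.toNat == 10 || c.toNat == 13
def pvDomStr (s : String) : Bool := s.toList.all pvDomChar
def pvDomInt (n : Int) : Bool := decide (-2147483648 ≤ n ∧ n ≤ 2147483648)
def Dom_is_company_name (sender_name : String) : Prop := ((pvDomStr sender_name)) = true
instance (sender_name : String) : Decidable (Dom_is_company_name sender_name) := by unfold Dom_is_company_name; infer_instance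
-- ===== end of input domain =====

-- B replaces A's per-suffix substring scans of the padded name by one split into
-- space-delimited tokens checked against a suffix set (objective: simpler).

-- ===== PORT A =====
def pvCompanySuffixes : List (List Char) :=
  ["kft".toList, "kft.".toList, "bt".toList, "bt.".toList, "zrt".toList, "zrt.".toList,
   "nyrt".toList, "nyrt.".toList, "rt".toList, "rt.".toList, "ev".toList, "ev.".toList,
   "e.v.".toList, "gmbh".toList, "ltd".toList, "llc".toList, "inc".toList, "ag".toList,
   "s.r.o.".toList]

-- the 'for suffix in _COMPANY_SUFFIXES' loop with its early returns
def pvCheckSuffixes (lower : List Char) : List (List Char) → Bool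
  | [] => false
  | s :: rest =>
    if PySem.Chars.endswith lower (' ' :: s) || PySem.Chars.isIn (' ' :: s ++ [' ']) (' ' :: lower ++ [' ']) then true
    else if PySem.Chars.endswith lower (' ' :: s ++ ['.']) then true
    else pvCheckSuffixes lower rest

def is_company_name (sender_name : String) : Bool :=
  if sender_name.toList = [] then false
  else
    let lower := PySem.Chars.strip (PySem.Chars.lower sender_name.toList)
    if pvCheckSuffixes lower pvCompanySuffixes then true
    else if decide (40 < PySem.Chars.len sender_name.toList) && PySem.Chars.isIn (" - ".toList) sender_name.toList then true
    else false

-- ===== PORT B =====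
-- suffixes = set(_COMPANY_SUFFIXES)  (the same module constant pvCompanySuffixes as A's)
def pvSuffixSet : PySem.Set (List Char) := PySem.Set.ofList pvCompanySuffixes

def is_company_name_alt (sender_name : String) : Bool :=
  if sender_name.toList = [] then false
  else
    let tokens := PySem.Chars.splitOn (PySem.Chars.strip (PySem.Chars.lower sender_name.toList)) [' ']
    if tokens.any (fun t => pvSuffixSet.contains t) then true
    else if decide (2 ≤ tokens.length) &&
            (match PySem.List.pyGet? tokens (-1) with
             | some last =>
                 PySem.Chars.endswith last ['.'] && pvSuffixSet.contains (PySem.Chars.slice last none (some (-1)))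
             | none => false) then true
    else decide (40 < PySem.Chars.len sender_name.toList) && PySem.Chars.isIn (" - ".toList) sender_name.toList

-- ===== PRECONDITION & SPEC =====
def Spec_is_company_name (sender_name : String) (out : Bool) : Prop := out = is_company_name_alt sender_name
instance (sender_name : String) (out : Bool) : Decidable (Spec_is_company_name sender_name out) := by unfold Spec_is_company_name; infer_instance

-- ===== CLAIM (what is proved, stated in full; the proofs are below) =====
def Claim_equal_is_company_name : Prop := ∀ (sender_name : String), Dom_is_company_name sender_name → Spec_is_company_name sender_name (is_company_name sender_name)

-- ===== LEMMAS AND PROOFS =====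

-- reference form of PySem.Chars.splitOn on the single-char separator ' '
def pvSplitAux : List Char → List Char → List (List Char)
  | [], cur => [cur.reverse]
  | c :: rest, cur => if c = ' ' then cur.reverse :: pvSplitAux rest [] else pvSplitAux rest (c :: cur)

lemma pvGo_eq (fuel : Nat) : ∀ (l cur : List Char) (acc : List (List Char)), l.length ≤ fuel →
    PySem.Chars.splitOn.go [' '] fuel l cur acc = acc.reverse ++ pvSplitAux l cur := by
  induction fuel with
  | zero =>
    intro l cur acc h
    have hl : l = [] := List.eq_nil_of_length_eq_zero (Nat.le_zero.mp h)
    subst hl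
    simp [PySem.Chars.splitOn.go, pvSplitAux]
  | succ n ih =>
    intro l cur acc h
    cases l with
    | nil => simp [PySem.Chars.splitOn.go, pvSplitAux]
    | cons c rest =>
      by_cases hc : c = ' '
      · subst hc
        have : PySem.Chars.splitOn.go [' '] (n+1) (' '::rest) cur acc
            = PySem.Chars.splitOn.go [' '] n rest [] (cur.reverse :: acc) := by
          simp [PySem.Chars.splitOn.go, List.isPrefixOf]
        rw [this, ih rest [] (cur.reverse :: acc) (by simpa using Nat.lt_succ_iff.mp (by simpa using h))]
        simp [pvSplitAux]
      · have : PySem.Chars.splitOn.go [' '] (n+1) (c::rest) cur acc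
            = PySem.Chars.splitOn.go [' '] n rest (c :: cur) acc := by
          simp [PySem.Chars.splitOn.go, List.isPrefixOf, Ne.symm hc]
        rw [this, ih rest (c :: cur) acc (by simpa using Nat.lt_succ_iff.mp (by simpa using h))]
        simp [pvSplitAux, hc]

lemma pvSplitOn_eq (l : List Char) : PySem.Chars.splitOn l [' '] = pvSplitAux l [] := by
  unfold PySem.Chars.splitOn
  rw [pvGo_eq (l.length + 1) l [] [] (by omega)]
  simp

lemma pvSplitAux_ne_nil (l cur : List Char) : pvSplitAux l cur ≠ [] := by
  induction l generalizing cur with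
  | nil => simp [pvSplitAux]
  | cons c rest ih =>
    by_cases hc : c = ' ' <;> simp [pvSplitAux, hc, ih]

lemma pvSplitAux_nospace (l : List Char) (h : ' ' ∉ l) (cur : List Char) :
    pvSplitAux l cur = [cur.reverse ++ l] := by
  induction l generalizing cur with
  | nil => simp [pvSplitAux]
  | cons c rest ih =>
    have hc : c ≠ ' ' := fun hc => h (by simp [hc])
    have hrest : ' ' ∉ rest := fun hm => h (by simp [hm])
    simp [pvSplitAux, hc, ih hrest]

lemma pvSplitAux_append_space (s : List Char) (h : ' ' ∉ s) (cur r : List Char) :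
    pvSplitAux (s ++ ' ' :: r) cur = (cur.reverse ++ s) :: pvSplitAux r [] := by
  induction s generalizing cur with
  | nil => simp [pvSplitAux]
  | cons c s' ih =>
    have hc : c ≠ ' ' := fun hc => h (by simp [hc])
    have hs' : ' ' ∉ s' := fun hm => h (by simp [hm])
    simp [pvSplitAux, hc, ih hs']

lemma pvSplitAux_len_one (l : List Char) : ∀ cur, (pvSplitAux l cur).length = 1 → ' ' ∉ l := by
  induction l with
  | nil => simp
  | cons c rest ih =>
    intro cur h
    by_cases hc : c = ' '
    · exfalso
      have h0 : (pvSplitAux rest []).length = 0 := by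
        have h' : (cur.reverse :: pvSplitAux rest []).length = 1 := by
          rw [show pvSplitAux (c :: rest) cur = cur.reverse :: pvSplitAux rest [] from by
            simp [pvSplitAux, hc]] at h
          exact h
        simpa using h'
      exact pvSplitAux_ne_nil rest [] (List.eq_nil_of_length_eq_zero h0)
    · have hrest := ih (c :: cur) (by simpa [pvSplitAux, hc] using h)
      intro hm
      rcases List.mem_cons.mp hm with h' | h'
      · exact hc h'.symm
      · exact hrest h' 

-- a token flanked by a space on the left and a space-or-end on the right is in the split
lemma pvMemSplit (t post : List Char) (ht : ' ' ∉ t) (hpost : post = [] ∨ ∃ p2, post = ' ' :: p2) :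
    ∀ (pre cur : List Char), t ∈ pvSplitAux (pre ++ ' ' :: t ++ post) cur := by
  intro pre
  induction pre with
  | nil =>
    intro cur
    have : ([] : List Char) ++ ' ' :: t ++ post = ' ' :: (t ++ post) := by simp
    rw [this]
    rcases hpost with rfl | ⟨p2, rfl⟩
    · simp [pvSplitAux, pvSplitAux_nospace t ht]
    · simp [pvSplitAux, pvSplitAux_append_space t ht]
  | cons d pre' ih =>
    intro cur
    have : (d :: pre') ++ ' ' :: t ++ post = d :: (pre' ++ ' ' :: t ++ post) := by simp
    rw [this]
    by_cases hd : d = ' '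
    · simp only [pvSplitAux, if_pos hd]
      exact List.mem_cons_of_mem _ (ih [])
    · simp only [pvSplitAux, if_neg hd]
      exact ih (d :: cur)

-- every token embeds into the padded string as " t "
lemma pvSplit_infix (t : List Char) : ∀ (l cur : List Char), ' ' ∉ cur → t ∈ pvSplitAux l cur →
    (' ' :: t ++ [' ']) <:+: (' ' :: (cur.reverse ++ l) ++ [' ']) := by
  intro l
  induction l with
  | nil =>
    intro cur hcur hmem
    simp [pvSplitAux] at hmem
    subst hmem
    simp
  | cons c rest ih =>
    intro cur hcur hmem
    by_cases hc : c = ' '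
    · subst hc
      rw [show pvSplitAux (' ' :: rest) cur = cur.reverse :: pvSplitAux rest [] from by
        simp [pvSplitAux]] at hmem
      rcases List.mem_cons.mp hmem with heq | hmem
      · subst heq
        exact ⟨[], rest ++ [' '], by simp⟩
      · have h1 := ih [] (by simp) hmem
        have h2 : (' ' :: rest ++ [' ']) <:+ (' ' :: (cur.reverse ++ ' ' :: rest) ++ [' ']) :=
          ⟨' ' :: cur.reverse, by simp⟩
        exact h1.trans (by simpa using h2.isInfix)
    · have h1 := ih (c :: cur) (by simp [hcur, Ne.symm hc]) (by simpa [pvSplitAux, hc] using hmem)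
      simpa using h1

-- " t " in " y "  ↔  t is a space-delimited token of y  (for t without spaces)
lemma pvInfix_iff_token (t y : List Char) (ht : ' ' ∉ t) :
    PySem.Chars.isIn (' ' :: t ++ [' ']) (' ' :: y ++ [' ']) = true ↔ t ∈ pvSplitAux y [] := by
  rw [PySem.Chars.isIn_iff_infix]
  constructor
  · rintro ⟨a, b, hab⟩
    cases a with
    | cons a0 a' =>
      have ha0 : a0 = ' ' := by
        have := congrArg (fun l => l.head?) hab
        simpa using this
      subst ha0
      have hy : a' ++ (' ' :: t ++ [' ']) ++ b = y ++ [' '] := by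
        have := congrArg List.tail hab
        simpa using this
      rcases List.eq_nil_or_concat b with rfl | ⟨b', x, rfl⟩
      · have h2 : (a' ++ ' ' :: t) ++ [' '] = y ++ [' '] := by simpa using hy
        have h3 := (List.append_inj' h2 rfl).1
        have := pvMemSplit t [] ht (Or.inl rfl) a' []
        rw [← h3]
        simpa using this
      · have h2 : (a' ++ ' ' :: t ++ [' '] ++ b') ++ [x] = y ++ [' '] := by
          simpa [List.concat_eq_append] using hy
        have h3 := (List.append_inj' h2 rfl).1
        have := pvMemSplit t (' ' :: b') ht (Or.inr ⟨b', rfl⟩) a' []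
        rw [← h3]
        simpa using this
    | nil =>
      have hy : (t ++ [' ']) ++ b = y ++ [' '] := by
        have := congrArg List.tail hab
        simpa using this
      rcases List.eq_nil_or_concat b with rfl | ⟨b', x, rfl⟩
      · have h3 : t = y := by simpa using hy
        rw [← h3, pvSplitAux_nospace t ht]
        simp
      · have h2 : (t ++ [' '] ++ b') ++ [x] = y ++ [' '] := by
          simpa [List.concat_eq_append] using hy
        have h3 := (List.append_inj' h2 rfl).1
        have h4 : t ++ [' '] ++ b' = t ++ ' ' :: b' := by simp
        rw [← h3, h4, pvSplitAux_append_space t ht]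
        simp
  · intro hmem
    have := pvSplit_infix t y [] (by simp) hmem
    simpa using this

-- y ends with " w"  ↔  y has ≥ 2 tokens and the last one is w  (for w without spaces)
lemma pvEndswith_iff_last (w : List Char) (hw : ' ' ∉ w) :
    ∀ (y cur : List Char), (PySem.Chars.endswith y (' ' :: w) = true ↔
      2 ≤ (pvSplitAux y cur).length ∧ (pvSplitAux y cur).getLast? = some w) := by
  intro y
  induction y with
  | nil =>
    intro cur
    constructor
    · intro h
      rw [PySem.Chars.endswith_iff] at h
      simp at h
    · rintro ⟨h2, -⟩
      simp [pvSplitAux] at h2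
  | cons c rest ih =>
    intro cur
    rw [PySem.Chars.endswith_iff, List.suffix_cons_iff]
    by_cases hc : c = ' '
    · subst hc
      have hS : pvSplitAux rest [] ≠ [] := pvSplitAux_ne_nil rest []
      have hlen : 1 ≤ (pvSplitAux rest []).length := List.length_pos_of_ne_nil hS
      have hlast : (cur.reverse :: pvSplitAux rest []).getLast? = (pvSplitAux rest []).getLast? := by
        cases h : pvSplitAux rest [] with
        | nil => exact absurd h hS
        | cons a l => simp
      constructor
      · rintro (heq | hsuf)
        · have hrw : rest = w := by
            have := congrArg List.tail heq
            simpa using this.symm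
          subst hrw
          refine ⟨by simp [pvSplitAux]; omega, ?_⟩
          rw [show pvSplitAux (' ' :: rest) cur = cur.reverse :: pvSplitAux rest [] from by
            simp [pvSplitAux], hlast, pvSplitAux_nospace rest hw]
          simp
        · have := (ih []).mp (by rwa [PySem.Chars.endswith_iff])
          refine ⟨by simp [pvSplitAux]; omega, ?_⟩
          rw [show pvSplitAux (' ' :: rest) cur = cur.reverse :: pvSplitAux rest [] from by
            simp [pvSplitAux], hlast]
          exact this.2
      · rintro ⟨-, hgl⟩
        rw [show pvSplitAux (' ' :: rest) cur = cur.reverse :: pvSplitAux rest [] from by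
          simp [pvSplitAux], hlast] at hgl
        rcases Nat.lt_or_ge (pvSplitAux rest []).length 2 with hlt | hge
        · have h1 : (pvSplitAux rest []).length = 1 := by omega
          have hns := pvSplitAux_len_one rest [] h1
          rw [pvSplitAux_nospace rest hns] at hgl
          simp at hgl
          exact Or.inl (by rw [hgl])
        · have := (ih []).mpr ⟨hge, hgl⟩
          rw [PySem.Chars.endswith_iff] at this
          exact Or.inr this
    · have hne : ¬ (' ' :: w = c :: rest) := fun h => hc (by
        have := congrArg List.head? h
        simpa using this.symm)
      rw [show pvSplitAux (c :: rest) cur = pvSplitAux rest (c :: cur) from by simp [pvSplitAux, hc]]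
      rw [← ih (c :: cur), PySem.Chars.endswith_iff]
      simp [hne]

lemma pvE1_imp_I (s y : List Char) (h : PySem.Chars.endswith y (' ' :: s) = true) :
    PySem.Chars.isIn (' ' :: s ++ [' ']) (' ' :: y ++ [' ']) = true := by
  rw [PySem.Chars.endswith_iff] at h
  obtain ⟨u, hu⟩ := h
  rw [PySem.Chars.isIn_iff_infix, ← hu]
  exact ⟨' ' :: u, [], by simp⟩

lemma pvCheck_eq_any (y : List Char) (L : List (List Char)) :
    pvCheckSuffixes y L = L.any (fun s =>
      (PySem.Chars.endswith y (' ' :: s) || PySem.Chars.isIn (' ' :: s ++ [' ']) (' ' :: y ++ [' '])) ||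
      PySem.Chars.endswith y (' ' :: s ++ ['.'])) := by
  induction L with
  | nil => simp [pvCheckSuffixes]
  | cons s rest ih =>
    rw [show pvCheckSuffixes y (s :: rest)
        = (if (PySem.Chars.endswith y (' ' :: s) || PySem.Chars.isIn (' ' :: s ++ [' ']) (' ' :: y ++ [' '])) then true
           else if PySem.Chars.endswith y (' ' :: s ++ ['.']) then true
           else pvCheckSuffixes y rest) from rfl]
    rw [List.any_cons, ih]
    cases h1 : (PySem.Chars.endswith y (' ' :: s) || PySem.Chars.isIn (' ' :: s ++ [' ']) (' ' :: y ++ [' '])) <;>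
      cases h2 : PySem.Chars.endswith y (' ' :: s ++ ['.']) <;> simp_all

-- the two suffix conditions agree on every string y
lemma pvMain (y : List Char) :
    pvCheckSuffixes y pvCompanySuffixes =
      ((pvSplitAux y []).any (fun t => pvSuffixSet.contains t) ||
       (decide (2 ≤ (pvSplitAux y []).length) &&
        (match PySem.List.pyGet? (pvSplitAux y []) (-1) with
         | some last =>
             PySem.Chars.endswith last ['.'] && pvSuffixSet.contains (PySem.Chars.slice last none (some (-1)))
         | none => false))) := by
  have hns : ∀ s ∈ pvCompanySuffixes, ' ' ∉ s := by decide
  have hSetMem : ∀ t : List Char, pvSuffixSet.contains t = true ↔ t ∈ pvCompanySuffixes := by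
    intro t
    rw [PySem.Set.contains_iff]
    exact PySem.Set.mem_ofList pvCompanySuffixes t
  set tokens := pvSplitAux y [] with htok
  have htne : tokens ≠ [] := pvSplitAux_ne_nil y []
  obtain ⟨L, hL⟩ := Option.isSome_iff_exists.mp (List.getLast?_isSome.mpr htne)
  rw [Bool.eq_iff_iff, pvCheck_eq_any, List.any_eq_true]
  have step1 : (∃ s ∈ pvCompanySuffixes,
      ((PySem.Chars.endswith y (' ' :: s) || PySem.Chars.isIn (' ' :: s ++ [' ']) (' ' :: y ++ [' '])) ||
        PySem.Chars.endswith y (' ' :: s ++ ['.'])) = true)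
      ↔ ((∃ s ∈ pvCompanySuffixes, s ∈ tokens) ∨
         (∃ s ∈ pvCompanySuffixes, 2 ≤ tokens.length ∧ tokens.getLast? = some (s ++ ['.']))) := by
    constructor
    · rintro ⟨s, hs, hcond⟩
      simp only [Bool.or_eq_true] at hcond
      rcases hcond with (h1 | h2) | h3
      · exact Or.inl ⟨s, hs, (pvInfix_iff_token s y (hns s hs)).mp (pvE1_imp_I s y h1)⟩
      · exact Or.inl ⟨s, hs, (pvInfix_iff_token s y (hns s hs)).mp h2⟩
      · refine Or.inr ⟨s, hs, ?_⟩
        have hw : ' ' ∉ s ++ ['.'] := by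
          intro hm
          rcases List.mem_append.mp hm with hm | hm
          · exact hns s hs hm
          · simp at hm
        exact (pvEndswith_iff_last (s ++ ['.']) hw y []).mp h3
    · rintro (⟨s, hs, hmem⟩ | ⟨s, hs, hcond⟩)
      · exact ⟨s, hs, by
          simp only [Bool.or_eq_true]
          exact Or.inl (Or.inr ((pvInfix_iff_token s y (hns s hs)).mpr hmem))⟩
      · refine ⟨s, hs, ?_⟩
        have hw : ' ' ∉ s ++ ['.'] := by
          intro hm
          rcases List.mem_append.mp hm with hm | hm
          · exact hns s hs hm
          · simp at hm
        simp only [Bool.or_eq_true]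
        exact Or.inr ((pvEndswith_iff_last (s ++ ['.']) hw y []).mpr hcond)
  rw [step1]
  have rhs1 : (tokens.any fun t => pvSuffixSet.contains t) = true ↔
      (∃ s ∈ pvCompanySuffixes, s ∈ tokens) := by
    rw [List.any_eq_true]
    constructor
    · rintro ⟨t, ht, hc⟩; exact ⟨t, (hSetMem t).mp hc, ht⟩
    · rintro ⟨s, hs, hmem⟩; exact ⟨s, hmem, (hSetMem s).mpr hs⟩
  have hget : PySem.List.pyGet? tokens (-1) = some L := by
    rw [PySem.List.pyGet?_neg_one, hL]
  have rhs2 : (decide (2 ≤ tokens.length) &&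
      (match PySem.List.pyGet? tokens (-1) with
       | some last =>
           PySem.Chars.endswith last ['.'] && pvSuffixSet.contains (PySem.Chars.slice last none (some (-1)))
       | none => false)) = true ↔
      (∃ s ∈ pvCompanySuffixes, 2 ≤ tokens.length ∧ tokens.getLast? = some (s ++ ['.'])) := by
    rw [hget]
    have hslice : PySem.Chars.slice L none (some (-1)) = L.dropLast := by
      rw [PySem.Chars.slice_eq_listSlice, PySem.List.slice_to_neg_one]
    simp only [Bool.and_eq_true, decide_eq_true_eq]
    constructor
    · rintro ⟨h2, hend, hcont⟩
      rw [PySem.Chars.endswith_iff] at hend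
      obtain ⟨l', hl'⟩ := hend
      refine ⟨L.dropLast, ?_, h2, ?_⟩
      · rw [← hSetMem]
        rwa [hslice] at hcont
      · rw [hL, ← hl']
        simp
    · rintro ⟨s, hs, h2, hgl⟩
      rw [hL] at hgl
      have hLs : L = s ++ ['.'] := by injection hgl
      refine ⟨h2, ?_, ?_⟩
      · rw [PySem.Chars.endswith_iff]
        exact ⟨s, hLs.symm⟩
      · rw [hslice, hLs, show (s ++ ['.']).dropLast = s from by simp]
        exact (hSetMem s).mpr hs
  rw [Bool.or_eq_true, rhs1, rhs2]

-- ===== VERDICT (by name: the statement is the Claim_ definition above) =====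
theorem is_company_name_spec : Claim_equal_is_company_name := by
  intro sender_name _
  unfold Spec_is_company_name is_company_name is_company_name_alt
  by_cases he : sender_name.toList = []
  · simp [he]
  · rw [if_neg he, if_neg he]
    simp only [pvSplitOn_eq]
    generalize PySem.Chars.strip (PySem.Chars.lower sender_name.toList) = y
    simp only [pvMain y]
    cases h1 : (pvSplitAux y []).any fun t => pvSuffixSet.contains t <;>
      cases h2 : (decide (2 ≤ (pvSplitAux y []).length) &&
          match PySem.List.pyGet? (pvSplitAux y []) (-1) with
          | some last =>
              PySem.Chars.endswith last ['.'] && pvSuffixSet.contains (PySem.Chars.slice last none (some (-1)))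
          | none => false) <;>
      simp_all
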